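-- pv_equiv track=rewrite | github.com/alperersy/morseaic | Morseaic.py | pattern_transformer
-- ===== SOURCE A (Python) =====
-- def pattern_transformer(pattern_array, int_morse_table):
--     temp_element_list = []
--     temp_letter_list = []
--     output_string = []
--
--     for i in range(len(pattern_array)):
--         element = pattern_array[i]
--
--         if element == "type2":
--             temp_letter_list.append("".join(temp_element_list))
--
--             output_string.append(int_morse_table["".join(temp_letter_list)])
--             output_string.append(" ")
--
--             temp_element_list.clear()
--             temp_letter_list.clear()
--
--         elif element != "type1" and element != "type2":
--             temp_element_list.append(element)
--
--
--     translated_string = "".join(output_string)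
--
--     return translated_string
-- ===== SOURCE B (Python) =====
-- def pattern_transformer(pattern_array, int_morse_table):
--     # Pass 1: split the array into segments, one per terminating "type2"
--     # (a trailing segment with no "type2" after it is discarded).
--     segments = []
--     current = []
--     for element in pattern_array:
--         if element == "type2":
--             segments.append(current)
--             current = []
--         else:
--             current.append(element)
--     # Pass 2: each segment's non-"type1" elements form the lookup key.
--     keys = ["".join(e for e in seg if e != "type1") for seg in segments]
--     return "".join(int_morse_table[key] + " " for key in keys)
-- ===== Notes on version B (the rewrite author's own statement) =====
-- stated objective: simpler
-- what changed: Replaces A's single interleaved loop (which maintains three parallel buffers and does table lookups mid-loop) by a two-phase decomposition: first split the array into raw 'type2'-terminated segments, then map each segment to its filtered key, its table lookup and a trailing space, and join.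
import Mathlib
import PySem

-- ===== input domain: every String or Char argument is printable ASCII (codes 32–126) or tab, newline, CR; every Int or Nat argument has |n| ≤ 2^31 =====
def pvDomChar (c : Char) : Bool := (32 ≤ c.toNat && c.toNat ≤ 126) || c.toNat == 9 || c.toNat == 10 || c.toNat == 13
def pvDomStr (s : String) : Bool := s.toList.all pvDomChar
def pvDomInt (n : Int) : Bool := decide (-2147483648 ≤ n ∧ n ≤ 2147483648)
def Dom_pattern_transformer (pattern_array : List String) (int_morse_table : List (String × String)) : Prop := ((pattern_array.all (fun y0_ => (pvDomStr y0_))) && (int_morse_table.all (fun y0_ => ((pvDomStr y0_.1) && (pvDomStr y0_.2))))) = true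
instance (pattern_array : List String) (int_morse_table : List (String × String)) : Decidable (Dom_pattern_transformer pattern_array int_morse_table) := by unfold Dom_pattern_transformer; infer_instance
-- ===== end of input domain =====

-- B replaces A's single interleaved loop by a two-phase decomposition (split into
-- segments, then map lookups); same cost, simpler to read. Equivalence of RETURN values.

-- ===== PORT A =====
-- One loop step of A's for-loop; state = (temp_element_list, temp_letter_list, output_string).
-- dict[key] (KeyError when absent) is ported as get? + getD ""; Pre_ excludes the none case.
def pvStepA (int_morse_table : List (String × String))
    (st : List String × List String × List String) (element : String) :
    List String × List String × List String :=
  if element == "type2" then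
    let temp_letter := st.2.1 ++ [PySem.Str.join "" st.1]
    ([], [],
      st.2.2 ++ [((PySem.Dict.mk int_morse_table).get? (PySem.Str.join "" temp_letter)).getD ""]
        ++ [" "])
  else if element != "type1" && element != "type2" then
    (st.1 ++ [element], st.2.1, st.2.2)
  else st

def pattern_transformer (pattern_array : List String) (int_morse_table : List (String × String)) : String :=
  let final := pattern_array.foldl (pvStepA int_morse_table) ([], [], [])
  PySem.Str.join "" final.2.2

-- ===== PORT B =====
-- Pass 1 of Source B: split into "type2"-terminated segments; state = (segments, current).
def pvSplitStep (st : List (List String) × List String) (element : String) :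
    List (List String) × List String :=
  if element == "type2" then (st.1 ++ [st.2], []) else (st.1, st.2 ++ [element])

def pvSegments (pattern_array : List String) : List (List String) :=
  (pattern_array.foldl pvSplitStep ([], [])).1

def pattern_transformer_alt (pattern_array : List String) (int_morse_table : List (String × String)) : String :=
  let keys := (pvSegments pattern_array).map
    (fun seg => PySem.Str.join "" (seg.filter (fun e => e != "type1")))
  PySem.Str.join "" (keys.map
    (fun key => ((PySem.Dict.mk int_morse_table).get? key).getD "" ++ " "))

-- ===== PRECONDITION & SPEC =====
-- Pre_ excludes exactly the inputs where Python A raises KeyError: some completed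
-- segment's key (its non-"type1" elements joined) is absent from the table.
def Pre_pattern_transformer (pattern_array : List String) (int_morse_table : List (String × String)) : Prop :=
  ∀ seg ∈ pvSegments pattern_array,
    ((PySem.Dict.mk int_morse_table).get?
      (PySem.Str.join "" (seg.filter (fun e => e != "type1")))).isSome = true
instance (pattern_array : List String) (int_morse_table : List (String × String)) : Decidable (Pre_pattern_transformer pattern_array int_morse_table) := by unfold Pre_pattern_transformer; infer_instance

def pvWitness_pattern_transformer : List String × (List (String × String)) :=
  (["a", "type1", "b", "type2"], [("ab", ".-")])

def Spec_pattern_transformer (pattern_array : List String) (int_morse_table : List (String × String)) (out : String) : Prop := out = pattern_transformer_alt pattern_array int_morse_table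
instance (pattern_array : List String) (int_morse_table : List (String × String)) (out : String) : Decidable (Spec_pattern_transformer pattern_array int_morse_table out) := by unfold Spec_pattern_transformer; infer_instance

-- ===== CLAIM (what is proved, stated in full; the proofs are below) =====
def Claim_equal_pattern_transformer : Prop := ∀ (pattern_array : List String) (int_morse_table : List (String × String)), Dom_pattern_transformer pattern_array int_morse_table → Pre_pattern_transformer pattern_array int_morse_table → Spec_pattern_transformer pattern_array int_morse_table (pattern_transformer pattern_array int_morse_table)

-- ===== LEMMAS AND PROOFS =====

theorem pvWitness_ok : Dom_pattern_transformer pvWitness_pattern_transformer.1 pvWitness_pattern_transformer.2 ∧ Pre_pattern_transformer pvWitness_pattern_transformer.1 pvWitness_pattern_transformer.2 := by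
  decide

-- joining with the empty separator is flattening
theorem pvJoin_nil_sep (l : List (List Char)) : PySem.Chars.join [] l = l.flatten := by
  induction l with
  | nil => simp [PySem.Chars.join, List.intercalate]
  | cons a t ih =>
    cases t with
    | nil => simp [PySem.Chars.join_singleton]
    | cons b u => rw [PySem.Chars.join_cons_cons]; simp_all

theorem pvSjoin_append (l1 l2 : List String) :
    PySem.Str.join "" (l1 ++ l2) = PySem.Str.join "" l1 ++ PySem.Str.join "" l2 := by
  simp [PySem.Str.join, pvJoin_nil_sep, String.ofList_append]

theorem pvSjoin_singleton (s : String) : PySem.Str.join "" [s] = s := by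
  simp [PySem.Str.join, PySem.Chars.join_singleton]

theorem pvSjoin_nil : PySem.Str.join "" [] = "" := by
  simp [PySem.Str.join, PySem.Chars.join, List.intercalate]

theorem pvSjoin_cons (s : String) (l : List String) :
    PySem.Str.join "" (s :: l) = s ++ PySem.Str.join "" l := by
  have := pvSjoin_append [s] l
  simpa [pvSjoin_singleton] using this

-- unfolding the two step functions on each kind of element
theorem pvStepA_type2 (tbl : List (String × String)) (st : List String × List String × List String) :
    pvStepA tbl st "type2" =
      ([], [], st.2.2 ++ [((PySem.Dict.mk tbl).get?
        (PySem.Str.join "" (st.2.1 ++ [PySem.Str.join "" st.1]))).getD "", " "]) := by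
  simp [pvStepA]

theorem pvStepA_type1 (tbl : List (String × String)) (st : List String × List String × List String) :
    pvStepA tbl st "type1" = st := by
  simp [pvStepA]

theorem pvStepA_other (tbl : List (String × String)) (st : List String × List String × List String)
    (e : String) (h2 : e ≠ "type2") (h1 : e ≠ "type1") :
    pvStepA tbl st e = (st.1 ++ [e], st.2.1, st.2.2) := by
  simp [pvStepA, h1, h2]

theorem pvSplitStep_type2 (st : List (List String) × List String) :
    pvSplitStep st "type2" = (st.1 ++ [st.2], []) := by
  simp [pvSplitStep]

theorem pvSplitStep_other (st : List (List String) × List String) (e : String) (h2 : e ≠ "type2") :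
    pvSplitStep st e = (st.1, st.2 ++ [e]) := by
  simp [pvSplitStep, h2]

-- the segments accumulator appends
theorem pvSegs_acc (xs : List String) : ∀ (gs : List (List String)) (cur : List String),
    (List.foldl pvSplitStep (gs, cur) xs).1 = gs ++ (List.foldl pvSplitStep ([], cur) xs).1 := by
  induction xs with
  | nil => intro gs cur; simp
  | cons e xs ih =>
    intro gs cur
    by_cases h : e = "type2"
    · subst h
      rw [List.foldl_cons, List.foldl_cons, pvSplitStep_type2, pvSplitStep_type2,
        List.nil_append, ih (gs ++ [cur]) [], ih [cur] []]
      simp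
    · rw [List.foldl_cons, List.foldl_cons, pvSplitStep_other _ _ h, pvSplitStep_other _ _ h]
      exact ih gs (cur ++ [e])

-- per-key output (lookup followed by one space)
def pvG (int_morse_table : List (String × String)) (seg : List String) : String :=
  ((PySem.Dict.mk int_morse_table).get?
    (PySem.Str.join "" (seg.filter (fun e => e != "type1")))).getD "" ++ " "

-- main invariant: A's fold from a filtered buffer equals out ++ B's per-segment outputs
theorem pvMain (tbl : List (String × String)) (xs : List String) :
    ∀ (cur out : List String),
    PySem.Str.join "" ((List.foldl (pvStepA tbl) (cur.filter (fun e => e != "type1"), [], out) xs).2.2)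
      = PySem.Str.join "" out
        ++ PySem.Str.join "" (((List.foldl pvSplitStep ([], cur) xs).1).map (pvG tbl)) := by
  induction xs with
  | nil => intro cur out; simp [pvSjoin_nil]
  | cons e xs ih =>
    intro cur out
    by_cases h : e = "type2"
    · subst h
      rw [List.foldl_cons, List.foldl_cons, pvStepA_type2, pvSplitStep_type2]
      dsimp only
      have H := ih [] (out ++ [((PySem.Dict.mk tbl).get?
        (PySem.Str.join "" ([] ++ [PySem.Str.join "" (cur.filter (fun e => e != "type1"))]))).getD "", " "])
      simp only [List.filter_nil, List.nil_append] at H ⊢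
      rw [H, pvSegs_acc xs [cur] []]
      simp [pvG, pvSjoin_append, pvSjoin_cons, pvSjoin_nil, String.append_assoc,
        String.append_empty]
    · rw [List.foldl_cons, List.foldl_cons, pvSplitStep_other _ _ h]
      by_cases h1 : e = "type1"
      · subst h1
        rw [pvStepA_type1]
        have H := ih (cur ++ ["type1"]) out
        rw [show (cur ++ ["type1"]).filter (fun e => e != "type1")
              = cur.filter (fun e => e != "type1") from by simp [List.filter_append]] at H
        exact H
      · rw [pvStepA_other _ _ _ h h1]
        have H := ih (cur ++ [e]) out
        rw [show (cur ++ [e]).filter (fun e => e != "type1")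
              = cur.filter (fun e => e != "type1") ++ [e] from by simp [List.filter_append, h1]] at H
        exact H

-- ===== VERDICT (by name: the statement is the Claim_ definition above) =====
theorem pattern_transformer_spec : Claim_equal_pattern_transformer := by
  intro pattern_array int_morse_table _hdom _hpre
  unfold Spec_pattern_transformer pattern_transformer pattern_transformer_alt pvSegments
  dsimp only
  have h := pvMain int_morse_table pattern_array [] []
  simp only [List.filter_nil] at h
  rw [h, List.map_map]
  have hfun : ((fun key => ((PySem.Dict.mk int_morse_table).get? key).getD "" ++ " ") ∘
      (fun seg => PySem.Str.join "" (seg.filter (fun e => e != "type1"))))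
      = pvG int_morse_table := by
    funext seg; rfl
  rw [hfun, pvSjoin_nil, String.empty_append]
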